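-- pv_equiv track=rewrite | github.com/philipsantiagoo/IP | lista_06/a.py | descripitografando
-- ===== SOURCE A (Python) =====
-- def shift_ascii_chars(caractere, deslocamento_shift, conjunto_caracteres_permitidos):
--     # nosso objetivo é deslocar o 'caractere' dento do 'conjunto_caracteres_permitidos', dentro do limite de tamnho permito
--
--     # verifico se caractere tá no conjunto
--     if caractere in conjunto_caracteres_permitidos:
--         # obetendo o índice do danado
--         posicao_atual_caractere = conjunto_caracteres_permitidos.index(caractere)
--
--         # calculando a nova posição após o deslocamento shift
--         nova_posicao_atual_caractere = (posicao_atual_caractere + deslocamento_shift) % len(conjunto_caracteres_permitidos)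
--
--         # retorna o novo caractere
--         return conjunto_caracteres_permitidos[nova_posicao_atual_caractere]
--
--     else:
--         # caractere não tava nos permitidos
--         return caractere
--
-- def descripitografando(nome_criptogafado, conjunto_caracteres_permitidos):
--     # vendo onde tá o meio do nome
--     meio_nome = len(nome_criptogafado) // 2
--
--     # aquelas regras lá, tu sabe, tu ta ligado já que eu sei
--     if len(nome_criptogafado) % 2 == 0:
--         primeira_metade_nome_criptografado = nome_criptogafado[:meio_nome]
--         segunda_metade_nome_criptografado = nome_criptogafado[meio_nome:]
--     else:
--         primeira_metade_nome_criptografado = nome_criptogafado[:meio_nome]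
--         segunda_metade_nome_criptografado = nome_criptogafado[meio_nome:]
--
--     segunda_metade_nome_criptografado = [
--         shift_ascii_chars(caractere, 1, conjunto_caracteres_permitidos)
--         for caractere in segunda_metade_nome_criptografado
--     ]
--
--     combinado = list(primeira_metade_nome_criptografado) + segunda_metade_nome_criptografado
--
--     combinado_revertido = combinado[::-1]
--
--     resultado = [
--         shift_ascii_chars(caractere, -3, conjunto_caracteres_permitidos)
--         for caractere in combinado_revertido
--         ]
--
--     return ''.join(resultado)
-- ===== SOURCE B (Python) =====
-- def descripitografando(nome_criptogafado, conjunto_caracteres_permitidos):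
--     s = conjunto_caracteres_permitidos
--     n = len(s)
--     # decode tables built once by zipping the alphabet with its rotations
--     # (setdefault keeps the first occurrence, matching str.index)
--     t1 = {}
--     t3 = {}
--     if n:
--         m1 = 1 % n
--         m3 = (-3) % n
--         for a, b, c in zip(s, s[m1:] + s[:m1], s[m3:] + s[:m3]):
--             t1.setdefault(a, b)
--             t3.setdefault(a, c)
--     # second-half chars were shifted +1 before the final -3: compose once, per alphabet char
--     dec2 = {a: t3.get(b, b) for a, b in t1.items()}
--     meio = len(nome_criptogafado) // 2
--     out = []
--     # walk the name backwards, emitting the decoded string directly in final order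
--     for i in range(len(nome_criptogafado) - 1, -1, -1):
--         c = nome_criptogafado[i]
--         out.append(t3.get(c, c) if i < meio else dec2.get(c, c))
--     return ''.join(out)
-- ===== Notes on version B (the rewrite author's own statement) =====
-- stated objective: faster
-- what changed: Instead of A's three staged passes (shift second half by +1 with a per-character O(n) str.index scan, concatenate, reverse a copy, shift everything by -3 with another per-character scan), B builds the two decode tables once by zipping the alphabet with its rotations, composes the +1 and -3 steps into a single second-half table, and walks the name backwards emitting the decoded string directly in final order in one pass.
import Mathlib
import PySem

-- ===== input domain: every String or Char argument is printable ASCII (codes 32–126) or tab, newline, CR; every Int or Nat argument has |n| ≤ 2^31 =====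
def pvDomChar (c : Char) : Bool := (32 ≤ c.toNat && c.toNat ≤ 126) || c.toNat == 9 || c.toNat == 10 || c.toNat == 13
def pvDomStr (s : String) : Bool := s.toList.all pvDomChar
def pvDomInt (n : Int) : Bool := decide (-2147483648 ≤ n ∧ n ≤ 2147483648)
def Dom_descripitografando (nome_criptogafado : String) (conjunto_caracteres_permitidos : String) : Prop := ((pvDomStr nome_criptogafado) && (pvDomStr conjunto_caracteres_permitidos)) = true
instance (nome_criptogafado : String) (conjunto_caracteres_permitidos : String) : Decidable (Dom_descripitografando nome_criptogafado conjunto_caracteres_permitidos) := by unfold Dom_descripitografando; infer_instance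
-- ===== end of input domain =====

-- B builds composed decode tables once by zipping the alphabet with its rotations and walks the
-- name backwards, emitting the decoded string directly in final order (alternative decomposition, faster tables).

-- ===== PORT A =====
def shift_ascii_chars (caractere : Char) (deslocamento_shift : Int) (conjunto_caracteres_permitidos : List Char) : Char :=
  if caractere ∈ conjunto_caracteres_permitidos then
    match PySem.List.index? conjunto_caracteres_permitidos caractere with
    | some posicao_atual =>
        let nova_posicao : Int :=
          PySem.Int.mod ((posicao_atual : Int) + deslocamento_shift) (conjunto_caracteres_permitidos.length : Int)
        -- conjunto[nova_posicao]: the index is in range (0 ≤ mod < len, len > 0 here)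
        PySem.List.pyGetD conjunto_caracteres_permitidos nova_posicao caractere
    | none => caractere
  else caractere

def descripitografando (nome_criptogafado : String) (conjunto_caracteres_permitidos : String) : String :=
  let nl := nome_criptogafado.toList
  let cl := conjunto_caracteres_permitidos.toList
  let meio_nome : Int := PySem.Int.floordiv (nl.length : Int) 2
  -- Python's if/else has identical branches; transliterated as written
  let primeira :=
    if PySem.Int.mod (nl.length : Int) 2 == 0
    then PySem.List.slice nl none (some meio_nome)
    else PySem.List.slice nl none (some meio_nome)
  let segunda :=
    if PySem.Int.mod (nl.length : Int) 2 == 0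
    then PySem.List.slice nl (some meio_nome) none
    else PySem.List.slice nl (some meio_nome) none
  let segunda_shift := segunda.map (fun c => shift_ascii_chars c 1 cl)
  let combinado := primeira ++ segunda_shift
  let combinado_revertido := (PySem.List.slice? combinado none none (-1)).getD []  -- combinado[::-1]
  let resultado := combinado_revertido.map (fun c => shift_ascii_chars c (-3) cl)
  String.ofList resultado  -- ''.join(resultado)

-- ===== PORT B =====
-- the table-building loop body: t1.setdefault(a, b); t3.setdefault(a, c)  over a triple ((a, b), c)
def pvTabStep (t : PySem.Dict Char Char × PySem.Dict Char Char) (p : (Char × Char) × Char) :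
    PySem.Dict Char Char × PySem.Dict Char Char :=
  (t.1.setdefault p.1.1 p.1.2, t.2.setdefault p.1.1 p.2)

def descripitografando_alt (nome_criptogafado : String) (conjunto_caracteres_permitidos : String) : String :=
  let s := conjunto_caracteres_permitidos.toList
  let n : Int := (s.length : Int)
  let tabs :=
    if 0 < s.length then
      let m1 := PySem.Int.mod 1 n
      let m3 := PySem.Int.mod (-3) n
      let r1 := PySem.List.slice s (some m1) none ++ PySem.List.slice s none (some m1)
      let r3 := PySem.List.slice s (some m3) none ++ PySem.List.slice s none (some m3)
      ((s.zip r1).zip r3).foldl pvTabStep (PySem.Dict.empty, PySem.Dict.empty)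
    else (PySem.Dict.empty, PySem.Dict.empty)
  let t1 := tabs.1
  let t3 := tabs.2
  -- dec2 = {a: t3.get(b, b) for a, b in t1.items()}
  let dec2 := t1.items.foldl (fun d p => d.insert p.1 (t3.getD p.2 p.2)) PySem.Dict.empty
  let nl := nome_criptogafado.toList
  let meio : Int := PySem.Int.floordiv (nl.length : Int) 2
  -- for i in range(len(nome)-1, -1, -1): out.append(...); nome[i] is always in range here
  let out := (PySem.List.pyRange ((nl.length : Int) - 1) (-1) (-1)).foldl
    (fun out i =>
      out ++ [let c := PySem.List.pyGetD nl i ' '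
              if i < meio then t3.getD c c else dec2.getD c c]) []
  String.ofList out

-- ===== PRECONDITION & SPEC =====
def Spec_descripitografando (nome_criptogafado : String) (conjunto_caracteres_permitidos : String) (out : String) : Prop := out = descripitografando_alt nome_criptogafado conjunto_caracteres_permitidos
instance (nome_criptogafado : String) (conjunto_caracteres_permitidos : String) (out : String) : Decidable (Spec_descripitografando nome_criptogafado conjunto_caracteres_permitidos out) := by unfold Spec_descripitografando; infer_instance

-- ===== CLAIM (what is proved, stated in full; the proofs are below) =====
def Claim_equal_descripitografando : Prop := ∀ (nome_criptogafado : String) (conjunto_caracteres_permitidos : String), Dom_descripitografando nome_criptogafado conjunto_caracteres_permitidos → Spec_descripitografando nome_criptogafado conjunto_caracteres_permitidos (descripitografando nome_criptogafado conjunto_caracteres_permitidos)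

-- ===== LEMMAS AND PROOFS =====

theorem pv_get?_foldl_setdefault (l : List (Char × Char)) (d : PySem.Dict Char Char) (c : Char) :
    ((l.foldl (fun d p => d.setdefault p.1 p.2) d).get? c)
      = (d.get? c).or ((l.find? (fun p => p.1 == c)).map (·.2)) := by
  induction l generalizing d with
  | nil => simp
  | cons p t ih =>
      simp only [List.foldl_cons, List.find?_cons, ih]
      by_cases hc : p.1 = c
      · subst hc
        rw [PySem.Dict.get?_setdefault_self]
        simp only [beq_self_eq_true]
        cases h : d.get? p.1 <;> simp
      · rw [PySem.Dict.get?_setdefault_of_ne _ _ (Ne.symm hc)]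
        have hb : (p.1 == c) = false := by simp [hc]
        simp [hb]

theorem pv_nodup_keys_foldl_setdefault (l : List (Char × Char)) (d : PySem.Dict Char Char)
    (h : d.keys.Nodup) : ((l.foldl (fun d p => d.setdefault p.1 p.2) d).keys).Nodup := by
  induction l generalizing d with
  | nil => exact h
  | cons p t ih =>
      simp only [List.foldl_cons]
      apply ih
      by_cases hc : d.contains p.1
      · rw [PySem.Dict.setdefault_of_contains _ _ hc]; exact h
      · rw [PySem.Dict.setdefault_of_not_contains _ _ (by simpa using hc)]
        exact PySem.Dict.nodup_keys_insert _ _ _ h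

theorem pv_find?_zip (s r : List Char) (c : Char) (h : s.length = r.length) :
    (s.zip r).find? (fun p => p.1 == c)
      = (PySem.List.index? s c).map (fun i => (c, r.getD i c)) := by
  induction s generalizing r with
  | nil => simp [PySem.List.index?]
  | cons x t ih =>
      cases r with
      | nil => simp at h
      | cons y u =>
          simp only [List.zip_cons_cons, List.find?_cons]
          by_cases hx : x = c
          · subst hx
            rw [PySem.List.index?_cons_self]
            simp
          · rw [PySem.List.index?_cons_of_ne _ hx]
            have := ih u (by simpa using h)
            simp only [show ((x, y).1 == c) = false by simpa using hx]
            rw [this, Option.map_map]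
            cases PySem.List.index? t c <;> simp

theorem pv_rot_getD (s : List Char) (a i : Nat) (ha : a ≤ s.length) (hi : i < s.length) (d : Char) :
    (s.drop a ++ s.take a).getD i d = s.getD ((i + a) % s.length) d := by
  have hn : 0 < s.length := Nat.lt_of_le_of_lt (Nat.zero_le i) hi
  by_cases hcase : i < s.length - a
  · rw [List.getD_append _ _ _ _ (by simp [List.length_drop]; omega)]
    have hm : (i + a) % s.length = i + a := Nat.mod_eq_of_lt (by omega)
    rw [hm]
    rw [List.getD_eq_getElem _ _ (by simp; omega),
        List.getD_eq_getElem _ _ (by omega)]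
    simp [List.getElem_drop]
    congr 1
    omega
  · rw [List.getD_append_right _ _ _ _ (by simp; omega)]
    have hm : (i + a) % s.length = i + a - s.length := by
      rw [Nat.mod_eq_sub_mod (by omega), Nat.mod_eq_of_lt (by omega)]
    rw [hm]
    rw [List.getD_eq_getElem _ _ (by simp; omega),
        List.getD_eq_getElem _ _ (by omega)]
    simp [List.getElem_take]
    congr 1
    omega

theorem pv_zip_zip_map (l1 : List Char) (l2 l3 : List Char) (h : l1.length = l2.length) :
    ((l1.zip l2).zip l3).map (fun p => (p.1.1, p.2)) = l1.zip l3 := by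
  induction l1 generalizing l2 l3 with
  | nil => simp
  | cons x t ih =>
      cases l2 with
      | nil => simp at h
      | cons y u =>
          cases l3 with
          | nil => simp
          | cons z w => simpa using ih u w (by simpa using h)

theorem pv_foldl_pvTabStep (l : List ((Char × Char) × Char)) (e : PySem.Dict Char Char × PySem.Dict Char Char) :
    l.foldl pvTabStep e
      = ((l.map (fun p => (p.1.1, p.1.2))).foldl (fun d p => d.setdefault p.1 p.2) e.1,
         (l.map (fun p => (p.1.1, p.2))).foldl (fun d p => d.setdefault p.1 p.2) e.2) := by
  induction l generalizing e with
  | nil => simp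
  | cons p t ih => simpa [pvTabStep] using ih _

theorem pv_tab_get? (s : List Char) (k : Int) (c : Char) (hs : 0 < s.length) :
    ((s.zip ((s.drop (PySem.Int.mod k (s.length : Int)).toNat) ++ (s.take (PySem.Int.mod k (s.length : Int)).toNat))).foldl
        (fun d p => d.setdefault p.1 p.2) PySem.Dict.empty).get? c
      = if c ∈ s then some (shift_ascii_chars c k s) else none := by
  have hn : (0 : Int) < (s.length : Int) := by exact_mod_cast hs
  set a : Nat := (PySem.Int.mod k (s.length : Int)).toNat with ha
  have hma : ((a : Int)) = PySem.Int.mod k (s.length : Int) :=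
    Int.toNat_of_nonneg (PySem.Int.mod_nonneg _ hn)
  have haless : a < s.length := by
    have := PySem.Int.mod_lt k hn
    omega
  have hlen : s.length = (s.drop a ++ s.take a).length := by simp; omega
  rw [pv_get?_foldl_setdefault, pv_find?_zip _ _ _ hlen]
  simp only [PySem.Dict.get?_empty, Option.none_or]
  by_cases hc : c ∈ s
  · obtain ⟨i, hi⟩ := Option.isSome_iff_exists.1 ((PySem.List.index?_isSome_iff s c).2 hc)
    obtain ⟨hilt, -, -⟩ := PySem.List.getElem_of_index?_eq_some hi
    rw [hi, if_pos hc]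
    simp only [Option.map_some]
    congr 1
    rw [pv_rot_getD s a i (le_of_lt haless) hilt]
    simp only [shift_ascii_chars, if_pos hc, hi]
    have hmod := PySem.Int.mod_nonneg ((i : Int) + k) hn
    have hmodlt := PySem.Int.mod_lt ((i : Int) + k) hn
    rw [PySem.List.pyGetD_eq_getElem s c hmod hmodlt]
    rw [List.getD_eq_getElem _ _ (Nat.mod_lt _ hs)]
    congr 1
    have hkey : (((i + a) % s.length : Nat) : Int) = PySem.Int.mod ((i : Int) + k) (s.length : Int) := by
      rw [PySem.Int.mod_eq_emod_of_pos hn] at hma ⊢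
      push_cast
      rw [Int.add_emod, hma, Int.emod_emod_of_dvd _ (dvd_refl _), ← Int.add_emod]
    omega
  · rw [(PySem.List.index?_eq_none_iff _ _).2 hc, if_neg hc]
    rfl

theorem pv_tab_getD (s : List Char) (k : Int) (c : Char) (hs : 0 < s.length) :
    ((s.zip ((s.drop (PySem.Int.mod k (s.length : Int)).toNat) ++ (s.take (PySem.Int.mod k (s.length : Int)).toNat))).foldl
        (fun d p => d.setdefault p.1 p.2) PySem.Dict.empty).getD c c
      = shift_ascii_chars c k s := by
  rw [PySem.Dict.getD_eq_get?_getD, pv_tab_get? s k c hs]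
  by_cases hc : c ∈ s
  · rw [if_pos hc]; rfl
  · rw [if_neg hc]
    unfold shift_ascii_chars
    rw [if_neg hc]
    rfl

theorem pv_dec2_getD (t1 t3 : PySem.Dict Char Char) (hnd : t1.keys.Nodup) (c : Char) :
    ((t1.items.foldl (fun d p => d.insert p.1 (t3.getD p.2 p.2)) PySem.Dict.empty).getD c c)
      = (match t1.get? c with | some b => t3.getD b b | none => c) := by
  have hitems := PySem.Dict.items_foldl_insert_fresh t1.items Prod.fst
      (fun p => t3.getD p.2 p.2) PySem.Dict.empty (fun a _ => PySem.Dict.contains_empty _)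
      (by simpa [PySem.Dict.keys] using hnd)
  have hei : (PySem.Dict.empty : PySem.Dict Char Char).items = [] := rfl
  set dec2 := t1.items.foldl (fun d p => d.insert p.1 (t3.getD p.2 p.2)) PySem.Dict.empty with hdef
  have hkeys : dec2.keys = t1.keys := by
    simp only [PySem.Dict.keys, hitems, hei]
    simp [List.map_map, Function.comp_def]
  cases h : t1.get? c with
  | none =>
      have hc : c ∉ t1.keys := (PySem.Dict.get?_eq_none_iff_not_mem_keys _ _).1 h
      have : dec2.get? c = none := (PySem.Dict.get?_eq_none_iff_not_mem_keys _ _).2 (hkeys ▸ hc)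
      rw [PySem.Dict.getD_eq_get?_getD, this]
      rfl
  | some b =>
      have hmem : (c, b) ∈ t1.items := (PySem.Dict.get?_eq_some_iff_mem_items _ _ _ hnd).1 h
      have hmem2 : (c, t3.getD b b) ∈ dec2.items := by
        rw [hitems, hei, List.nil_append]
        exact List.mem_map.2 ⟨(c, b), hmem, rfl⟩
      exact PySem.Dict.getD_of_mem_items _ hmem2 (hkeys ▸ hnd) _

-- ===== VERDICT (by name: the statement is the Claim_ definition above) =====
theorem descripitografando_spec : Claim_equal_descripitografando := by
  intro nome conj _
  unfold Spec_descripitografando descripitografando descripitografando_alt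
  simp only [ite_self]
  set s := conj.toList with hsdef
  set nl := nome.toList with hnldef
  have hm : PySem.Int.floordiv ((nl.length : Int)) 2 = ((nl.length / 2 : Nat) : Int) := by
    exact_mod_cast PySem.Int.floordiv_natCast nl.length 2
  set m : Nat := nl.length / 2 with hmdef
  have hmle : m ≤ nl.length := Nat.div_le_self _ _
  rw [hm, PySem.List.slice_to_natCast, PySem.List.slice_from_natCast,
      PySem.List.slice?_none_none_neg_one]
  simp only [Option.getD_some]
  -- name the tables
  set tabs := (if 0 < s.length then
      ((s.zip (PySem.List.slice s (some (PySem.Int.mod 1 (s.length : Int))) none ++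
               PySem.List.slice s none (some (PySem.Int.mod 1 (s.length : Int))))).zip
        (PySem.List.slice s (some (PySem.Int.mod (-3) (s.length : Int))) none ++
         PySem.List.slice s none (some (PySem.Int.mod (-3) (s.length : Int))))).foldl pvTabStep
        (PySem.Dict.empty, PySem.Dict.empty)
    else (PySem.Dict.empty, PySem.Dict.empty)) with htabs
  -- slices inside the tables are rotations by drop/take
  have hn0 : ∀ (hs : 0 < s.length), (0:Int) < (s.length : Int) := fun hs => by exact_mod_cast hs
  have hs1 : ∀ c, tabs.1.get? c = if c ∈ s then some (shift_ascii_chars c 1 s) else none := by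
    intro c
    rw [htabs]
    by_cases hs : 0 < s.length
    · have hn : (0:Int) < (s.length : Int) := hn0 hs
      rw [if_pos hs,
          PySem.List.slice_from _ (PySem.Int.mod_nonneg 1 hn),
          PySem.List.slice_to _ (PySem.Int.mod_nonneg 1 hn),
          PySem.List.slice_from _ (PySem.Int.mod_nonneg (-3) hn),
          PySem.List.slice_to _ (PySem.Int.mod_nonneg (-3) hn),
          pv_foldl_pvTabStep]
      have ha1 : (PySem.Int.mod 1 (s.length:Int)).toNat ≤ s.length := by
        have := PySem.Int.mod_lt 1 hn; omega
      have ha3 : (PySem.Int.mod (-3) (s.length:Int)).toNat ≤ s.length := by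
        have := PySem.Int.mod_lt (-3) hn; omega
      have hr1 : (s.drop (PySem.Int.mod 1 (s.length:Int)).toNat ++ s.take (PySem.Int.mod 1 (s.length:Int)).toNat).length = s.length := by
        simp; omega
      have hr3 : (s.drop (PySem.Int.mod (-3) (s.length:Int)).toNat ++ s.take (PySem.Int.mod (-3) (s.length:Int)).toNat).length = s.length := by
        simp; omega
      have hmap1 : (((s.zip (s.drop (PySem.Int.mod 1 (s.length:Int)).toNat ++ s.take (PySem.Int.mod 1 (s.length:Int)).toNat)).zip (s.drop (PySem.Int.mod (-3) (s.length:Int)).toNat ++ s.take (PySem.Int.mod (-3) (s.length:Int)).toNat)).map (fun p => (p.1.1, p.1.2)))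
          = s.zip (s.drop (PySem.Int.mod 1 (s.length:Int)).toNat ++ s.take (PySem.Int.mod 1 (s.length:Int)).toNat) := by
        have he : (fun (p : (Char × Char) × Char) => (p.1.1, p.1.2)) = Prod.fst := by
          funext p; rfl
        rw [he]
        apply List.map_fst_zip
        rw [List.length_zip, hr1, hr3]
        omega
      rw [hmap1, pv_tab_get? s 1 c hs]
    · rw [if_neg hs]
      have hsnil : s = [] := List.eq_nil_of_length_eq_zero (by omega)
      rw [if_neg (by simp [hsnil])]
      rfl
  have h3 : ∀ c, tabs.2.getD c c = shift_ascii_chars c (-3) s := by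
    intro c
    rw [htabs]
    by_cases hs : 0 < s.length
    · have hn : (0:Int) < (s.length : Int) := hn0 hs
      rw [if_pos hs,
          PySem.List.slice_from _ (PySem.Int.mod_nonneg 1 hn),
          PySem.List.slice_to _ (PySem.Int.mod_nonneg 1 hn),
          PySem.List.slice_from _ (PySem.Int.mod_nonneg (-3) hn),
          PySem.List.slice_to _ (PySem.Int.mod_nonneg (-3) hn),
          pv_foldl_pvTabStep]
      have hr1 : (s.drop (PySem.Int.mod 1 (s.length:Int)).toNat ++ s.take (PySem.Int.mod 1 (s.length:Int)).toNat).length = s.length := by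
        have := PySem.Int.mod_lt 1 hn; simp; omega
      rw [pv_zip_zip_map s _ _ hr1.symm, pv_tab_getD s (-3) c hs]
    · rw [if_neg hs]
      have hsnil : s = [] := List.eq_nil_of_length_eq_zero (by omega)
      simp [shift_ascii_chars, hsnil]
  have hnd1 : tabs.1.keys.Nodup := by
    rw [htabs]
    by_cases hs : 0 < s.length
    · rw [if_pos hs, pv_foldl_pvTabStep]
      exact pv_nodup_keys_foldl_setdefault _ _ (by simp [PySem.Dict.keys, PySem.Dict.empty])
    · rw [if_neg hs]
      simp [PySem.Dict.keys, PySem.Dict.empty]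
  have h2 : ∀ c, ((tabs.1.items.foldl (fun d p => d.insert p.1 (tabs.2.getD p.2 p.2)) PySem.Dict.empty).getD c c)
      = shift_ascii_chars (shift_ascii_chars c 1 s) (-3) s := by
    intro c
    rw [pv_dec2_getD _ _ hnd1 c, hs1 c]
    by_cases hc : c ∈ s
    · rw [if_pos hc]
      exact h3 _
    · rw [if_neg hc]
      simp [shift_ascii_chars, hc]
  -- the loop over the reversed range is the reversed decoded name
  apply congrArg String.ofList
  rw [PySem.List.pyRange_neg_one_eq_reverse,
      show ((-1:Int)+1) = 0 from rfl,
      show ((nl.length:Int) - 1 + 1) = (nl.length:Int) by ring,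
      PySem.List.foldl_append_singleton_eq_map, List.nil_append,
      List.map_reverse, List.map_reverse]
  apply congrArg List.reverse
  rw [List.map_append, List.map_map,
      PySem.List.pyRange_one_append 0 (m:Int) (nl.length:Int) (by positivity) (by exact_mod_cast hmle),
      List.map_append]
  have hinner1 : (PySem.List.pyRange 0 (m:Int)).map (fun i => PySem.List.pyGetD nl i ' ') = nl.take m := by
    have h0 := PySem.List.map_pyGetD_pyRange_zero' (nl.take m) ' '
    rw [List.length_take, min_eq_left hmle] at h0
    rw [← h0]
    apply List.map_congr_left
    intro i hi
    rw [PySem.List.mem_pyRange_one] at hi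
    rw [PySem.List.pyGetD_eq_getElem _ _ hi.1 (by omega),
        PySem.List.pyGetD_eq_getElem _ _ hi.1 (by rw [List.length_take]; push_cast; omega)]
    rw [List.getElem_take]
  have hinner2 : (PySem.List.pyRange (m:Int) (nl.length:Int)).map (fun i => PySem.List.pyGetD nl i ' ') = nl.drop m := by
    have h0 := PySem.List.map_pyGetD_pyRange' nl ' ' (a := (m:Int)) (by positivity)
    simpa using h0
  congr 1
  · have hcong : ∀ i ∈ PySem.List.pyRange 0 (m:Int),
        (if i < (m:Int) then tabs.2.getD (PySem.List.pyGetD nl i ' ') (PySem.List.pyGetD nl i ' ')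
         else ((tabs.1.items.foldl (fun d p => d.insert p.1 (tabs.2.getD p.2 p.2)) PySem.Dict.empty).getD (PySem.List.pyGetD nl i ' ') (PySem.List.pyGetD nl i ' ')))
          = shift_ascii_chars (PySem.List.pyGetD nl i ' ') (-3) s := by
      intro i hi
      rw [PySem.List.mem_pyRange_one] at hi
      rw [if_pos hi.2, h3]
    rw [List.map_congr_left hcong, ← hinner1, List.map_map]
    rfl
  · have hcong : ∀ i ∈ PySem.List.pyRange (m:Int) (nl.length:Int),
        (if i < (m:Int) then tabs.2.getD (PySem.List.pyGetD nl i ' ') (PySem.List.pyGetD nl i ' ')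
         else ((tabs.1.items.foldl (fun d p => d.insert p.1 (tabs.2.getD p.2 p.2)) PySem.Dict.empty).getD (PySem.List.pyGetD nl i ' ') (PySem.List.pyGetD nl i ' ')))
          = shift_ascii_chars (shift_ascii_chars (PySem.List.pyGetD nl i ' ') 1 s) (-3) s := by
      intro i hi
      rw [PySem.List.mem_pyRange_one] at hi
      rw [if_neg (by omega), h2]
    rw [List.map_congr_left hcong, ← hinner2, List.map_map]
    rfl
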